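-- pv_equiv track=rewrite | github.com/wsethbrown/NeverEndingQuest | module_builder.py | _deep_merge_area_updates
-- ===== SOURCE A (Python) =====
-- def _deep_merge_area_updates(original_data, hook_updates):
--     """Deep merge plot hook updates into area data, preserving all other data"""
--     import copy
--     result = copy.deepcopy(original_data)
--
--     # Create a lookup for location updates
--     location_updates = {}
--     for update in hook_updates:
--         location_id = update.get("locationId")
--         if location_id and "plotHooks" in update:
--             location_updates[location_id] = update["plotHooks"]
--
--     # Update only the plot hooks in matching locations
--     for location in result.get("locations", []):
--         location_id = location.get("locationId")
--         if location_id in location_updates: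
--             location["plotHooks"] = location_updates[location_id]
--
--     return result
-- ===== SOURCE B (Python) =====
-- import copy
--
-- def _deep_merge_area_updates(original_data, hook_updates):
--     """Deep merge plot hook updates into area data, preserving all other data"""
--     result = copy.deepcopy(original_data)
--     locations = result.get("locations", [])
--     # apply each qualifying update in order to every matching location; the
--     # last update for a given locationId naturally wins
--     for update in hook_updates:
--         location_id = update.get("locationId")
--         if location_id and "plotHooks" in update:
--             for location in locations:
--                 if location.get("locationId") == location_id:
--                     location["plotHooks"] = update["plotHooks"]
--     return result
-- ===== Notes on version B (the rewrite author's own statement) =====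
-- stated objective: alternative
-- what changed: Instead of precomputing a last-wins locationId->plotHooks dict and then patching each location once, B applies each qualifying hook update in order directly to every matching location, so the last update for an id wins by sequential overwrite.
import Mathlib
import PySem

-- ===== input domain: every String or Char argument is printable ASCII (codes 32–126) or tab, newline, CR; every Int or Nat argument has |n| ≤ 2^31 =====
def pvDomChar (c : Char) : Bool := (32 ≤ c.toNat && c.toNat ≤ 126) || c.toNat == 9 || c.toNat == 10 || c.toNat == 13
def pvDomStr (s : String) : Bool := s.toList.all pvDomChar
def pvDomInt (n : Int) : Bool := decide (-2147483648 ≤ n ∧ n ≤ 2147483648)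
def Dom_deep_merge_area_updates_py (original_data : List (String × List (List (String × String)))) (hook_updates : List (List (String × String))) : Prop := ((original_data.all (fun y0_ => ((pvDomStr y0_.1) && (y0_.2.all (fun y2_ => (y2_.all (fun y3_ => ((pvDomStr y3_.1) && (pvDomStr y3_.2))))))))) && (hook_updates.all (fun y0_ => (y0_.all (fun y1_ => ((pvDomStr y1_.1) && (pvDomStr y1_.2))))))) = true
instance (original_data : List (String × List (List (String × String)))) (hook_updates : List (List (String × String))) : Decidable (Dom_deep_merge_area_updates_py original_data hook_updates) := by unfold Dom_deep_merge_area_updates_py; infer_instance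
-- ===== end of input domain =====

-- B replaces A's precomputed last-wins update dict by applying each qualifying update in order
-- to every matching location (sequential overwrite; same return value, neither mutates its arguments).

-- ===== PORT A =====
-- one step of A's first loop: location_id = update.get("locationId"); if location_id and "plotHooks" in update: dict[location_id] = update["plotHooks"]
def pvStepA (acc : PySem.Dict String String) (update : List (String × String)) : PySem.Dict String String :=
  match (PySem.Dict.mk update).get? "locationId" with
  | some lid =>
      if ((lid != "") && (PySem.Dict.mk update).contains "plotHooks") then
        acc.insert lid ((PySem.Dict.mk update).getD "plotHooks" "")
      else acc
  | none => acc

-- body of A's second loop: if location_id in location_updates: location["plotHooks"] = location_updates[location_id]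
def pvMergeA (location_updates : PySem.Dict String String) (location : List (String × String)) : List (String × String) :=
  match (PySem.Dict.mk location).get? "locationId" with
  | some lid =>
      match location_updates.get? lid with
      | some hooks => ((PySem.Dict.mk location).insert "plotHooks" hooks).items
      | none => location
  | none => location

def deep_merge_area_updates_py (original_data : List (String × List (List (String × String)))) (hook_updates : List (List (String × String))) : List (String × List (List (String × String))) :=
  let location_updates := hook_updates.foldl pvStepA PySem.Dict.empty
  -- the second loop mutates the list stored under "locations" in result (a deepcopy of original_data);
  -- if the key is absent it iterates the default [] and result stays the copy of original_data
  if (PySem.Dict.mk original_data).contains "locations" then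
    ((PySem.Dict.mk original_data).insert "locations"
      (((PySem.Dict.mk original_data).getD "locations" []).map (pvMergeA location_updates))).items
  else original_data

-- ===== PORT B =====
-- B's outer-loop body: if update qualifies, walk the current locations and overwrite the
-- "plotHooks" entry of every location whose locationId equals the update's
def pvApplyB (locs : List (List (String × String))) (update : List (String × String)) : List (List (String × String)) :=
  match (PySem.Dict.mk update).get? "locationId" with
  | some lid =>
      if ((lid != "") && (PySem.Dict.mk update).contains "plotHooks") then
        locs.map (fun location =>
          if (PySem.Dict.mk location).get? "locationId" == some lid then
            ((PySem.Dict.mk location).insert "plotHooks" ((PySem.Dict.mk update).getD "plotHooks" "")).items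
          else location)
      else locs
  | none => locs

def deep_merge_area_updates_py_alt (original_data : List (String × List (List (String × String)))) (hook_updates : List (List (String × String))) : List (String × List (List (String × String))) :=
  -- locations = result.get("locations", []); the updates are folded over that list in order,
  -- then the (possibly) mutated list sits back under "locations" when the key exists
  let merged := hook_updates.foldl pvApplyB ((PySem.Dict.mk original_data).getD "locations" [])
  if (PySem.Dict.mk original_data).contains "locations" then
    ((PySem.Dict.mk original_data).insert "locations" merged).items
  else original_data

-- ===== PRECONDITION & SPEC =====
def Spec_deep_merge_area_updates_py (original_data : List (String × List (List (String × String)))) (hook_updates : List (List (String × String))) (out : List (String × List (List (String × String)))) : Prop := out = deep_merge_area_updates_py_alt original_data hook_updates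
instance (original_data : List (String × List (List (String × String)))) (hook_updates : List (List (String × String))) (out : List (String × List (List (String × String)))) : Decidable (Spec_deep_merge_area_updates_py original_data hook_updates out) := by unfold Spec_deep_merge_area_updates_py; infer_instance

-- ===== CLAIM (what is proved, stated in full; the proofs are below) =====
def Claim_equal_deep_merge_area_updates_py : Prop := ∀ (original_data : List (String × List (List (String × String)))) (hook_updates : List (List (String × String))), Dom_deep_merge_area_updates_py original_data hook_updates → Spec_deep_merge_area_updates_py original_data hook_updates (deep_merge_area_updates_py original_data hook_updates)

-- ===== LEMMAS AND PROOFS =====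

-- B's step applied to one location (pvApplyB is the map of this over the list)
def pvApplyLoc (location update : List (String × String)) : List (String × String) :=
  match (PySem.Dict.mk update).get? "locationId" with
  | some lid =>
      if ((lid != "") && (PySem.Dict.mk update).contains "plotHooks") then
        if (PySem.Dict.mk location).get? "locationId" == some lid then
          ((PySem.Dict.mk location).insert "plotHooks" ((PySem.Dict.mk update).getD "plotHooks" "")).items
        else location
      else location
  | none => location

theorem pvApplyB_eq_map (locs : List (List (String × String))) (u : List (String × String)) :
    pvApplyB locs u = locs.map (fun loc => pvApplyLoc loc u) := by
  unfold pvApplyB pvApplyLoc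
  cases (PySem.Dict.mk u).get? "locationId" with
  | none => simp
  | some lid => dsimp only; split_ifs <;> simp

-- the fold of pvApplyB commutes to a per-location fold
theorem foldl_pvApplyB (hu : List (List (String × String))) (locs : List (List (String × String))) :
    hu.foldl pvApplyB locs = locs.map (fun loc => hu.foldl pvApplyLoc loc) := by
  induction hu generalizing locs with
  | nil => simp
  | cons u rest ih =>
    rw [List.foldl_cons, pvApplyB_eq_map, ih, List.map_map]
    rfl

-- one right-end step: applying update u after merging with dict D = merging with pvStepA D u
theorem pvStep_commute (D : PySem.Dict String String) (u loc : List (String × String)) :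
    pvApplyLoc (pvMergeA D loc) u = pvMergeA (pvStepA D u) loc := by
  cases hg : (PySem.Dict.mk u).get? "locationId" with
  | none => simp [pvApplyLoc, pvStepA, hg]
  | some lid =>
    cases hguard : ((lid != "") && (PySem.Dict.mk u).contains "plotHooks") with
    | false =>
      simp only [PySem.Dict.contains_mk] at hguard
      simp [pvApplyLoc, pvStepA, hg, hguard]
    | true =>
      have hlid : lid ≠ "" := by
        intro h; subst h; simp at hguard
      simp only [PySem.Dict.contains_mk] at hguard
      cases hl0 : (PySem.Dict.mk loc).get? "locationId" with
      | none => simp [pvApplyLoc, pvMergeA, hg, hguard, hl0]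
      | some lid0 =>
        have hloc : ∀ g : String,
            ((PySem.Dict.mk loc).insert "plotHooks" g).get? "locationId" = some lid0 := by
          intro g
          rw [PySem.Dict.get?_insert_of_ne _ _ (by decide)]
          exact hl0
        by_cases heq : lid0 = lid
        · subst heq
          cases hD0 : D.get? lid0 with
          | some g =>
            have hmk : PySem.Dict.mk (((PySem.Dict.mk loc).insert "plotHooks" g).items)
                = (PySem.Dict.mk loc).insert "plotHooks" g := rfl
            simp [pvApplyLoc, pvStepA, pvMergeA, hg, hguard, hl0, hD0, hmk, hloc,
                  PySem.Dict.get?_insert_self, PySem.Dict.insert_insert_self]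
          | none =>
            simp [pvApplyLoc, pvStepA, pvMergeA, hg, hguard, hl0, hD0,
                  PySem.Dict.get?_insert_self]
        · have hne : ((D.insert lid ((PySem.Dict.mk u).getD "plotHooks" "")).get? lid0)
              = D.get? lid0 := PySem.Dict.get?_insert_of_ne _ _ heq
          cases hD0 : D.get? lid0 with
          | some g =>
            have hmk : PySem.Dict.mk (((PySem.Dict.mk loc).insert "plotHooks" g).items)
                = (PySem.Dict.mk loc).insert "plotHooks" g := rfl
            simp [pvApplyLoc, pvStepA, pvMergeA, hg, hguard, hl0, hD0, hmk, hne, hloc, heq]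
          | none =>
            simp [pvApplyLoc, pvStepA, pvMergeA, hg, hguard, hl0, hD0, hne, heq]

-- the per-location fold over updates equals A's dict-then-merge
theorem pvFold_eq_merge (hu : List (List (String × String))) (loc : List (String × String)) :
    hu.foldl pvApplyLoc loc = pvMergeA (hu.foldl pvStepA PySem.Dict.empty) loc := by
  induction hu using List.reverseRecOn with
  | nil =>
    unfold pvMergeA
    cases (PySem.Dict.mk loc).get? "locationId" <;> simp [PySem.Dict.get?_empty]
  | append_singleton rest u ih =>
    rw [List.foldl_append, List.foldl_append, List.foldl_cons, List.foldl_nil,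
        List.foldl_cons, List.foldl_nil, ih,
        pvStep_commute _ u loc]

-- ===== VERDICT (by name: the statement is the Claim_ definition above) =====
theorem deep_merge_area_updates_py_spec : Claim_equal_deep_merge_area_updates_py := by
  intro od hu _
  unfold Spec_deep_merge_area_updates_py deep_merge_area_updates_py deep_merge_area_updates_py_alt
  rw [foldl_pvApplyB]
  by_cases h : (PySem.Dict.mk od).contains "locations" = true <;>
    simp [h, List.map_congr_left (fun loc _ => (pvFold_eq_merge hu loc).symm)]
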